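-- pv_equiv track=rewrite | github.com/nuobit/odoo-addons | account_invoice_name_short/models/account_invoice.py | group_by_consecutives
-- ===== SOURCE A (Python) =====
-- def group_by_consecutives(values):
--     groups, group = [], []
--     ant = None
--     for t, n in sorted(values, key=lambda x: x[1]):
--         if ant is not None:
--             if n == ant + 1:
--                 group.append((t, n))
--             else:
--                 groups.append(group)
--                 group = [(t, n)]
--         else:
--             group.append((t, n))
--         ant = n
--     if group:
--         groups.append(group)
--     return groups
-- ===== SOURCE B (Python) =====
-- def group_by_consecutives(values):
--     # Repeatedly slice the maximal +1-consecutive run off the front of the sorted list.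
--     xs = sorted(values, key=lambda x: x[1])
--     groups = []
--     while xs:
--         k = 1
--         while k < len(xs) and xs[k][1] == xs[k - 1][1] + 1:
--             k += 1
--         groups.append(xs[:k])
--         xs = xs[k:]
--     return groups
-- ===== Notes on version B (the rewrite author's own statement) =====
-- stated objective: alternative
-- what changed: A's single pass with a previous-value tracker and a mutable current-group accumulator is replaced by a loop that scans the length of the next maximal +1-consecutive run and slices that whole run off the front of the sorted list.
import Mathlib
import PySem

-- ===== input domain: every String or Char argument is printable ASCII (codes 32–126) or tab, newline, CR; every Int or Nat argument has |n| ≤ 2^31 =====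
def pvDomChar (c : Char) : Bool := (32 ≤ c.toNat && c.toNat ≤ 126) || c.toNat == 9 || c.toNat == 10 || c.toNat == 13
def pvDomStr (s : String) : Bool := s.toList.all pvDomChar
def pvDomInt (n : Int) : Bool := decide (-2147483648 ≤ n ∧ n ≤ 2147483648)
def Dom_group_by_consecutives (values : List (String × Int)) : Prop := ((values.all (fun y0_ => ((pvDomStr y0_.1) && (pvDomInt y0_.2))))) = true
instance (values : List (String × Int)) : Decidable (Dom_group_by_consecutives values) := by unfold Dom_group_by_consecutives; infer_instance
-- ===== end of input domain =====

-- B re-decomposes A: instead of tracking the previous value with an accumulator group, it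
-- slices each maximal +1-consecutive run off the front of the sorted list and recurses (alternative, same cost).


-- ===== PORT A =====
-- Port of A: the for-loop over sorted(values, key=snd) becomes structural recursion
-- carrying the same state (groups, group, ant).
def aGo : List (String × Int) → List (List (String × Int)) → List (String × Int) → Option Int → List (List (String × Int))
  | [], groups, group, _ => if group = [] then groups else groups ++ [group]
  | (t, n) :: rest, groups, group, ant =>
    match ant with
    | some a =>
      if n = a + 1 then aGo rest groups (group ++ [(t, n)]) (some n)
      else aGo rest (groups ++ [group]) [(t, n)] (some n)
    | none => aGo rest groups (group ++ [(t, n)]) (some n)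

def group_by_consecutives (values : List (String × Int)) : List (List (String × Int)) :=
  aGo (PySem.List.sorted values (fun x => x.2)) [] [] none

-- ===== PORT B =====
-- Port of B's inner while loop: k starts at 1 and advances while xs[k][1] == xs[k-1][1] + 1;
-- recursing over adjacent pairs computes the same k with the same comparisons.
def runLen : List (String × Int) → Nat
  | [] => 0
  | [_] => 1
  | x :: y :: rest => if y.2 = x.2 + 1 then 1 + runLen (y :: rest) else 1

theorem runLen_pos (x : String × Int) (xs : List (String × Int)) : 1 ≤ runLen (x :: xs) := by
  cases xs with
  | nil => simp [runLen]
  | cons y ys => simp only [runLen]; split <;> omega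

-- xs[:k] / xs[k:] with 0 ≤ k ≤ len(xs) are exactly List.take / List.drop.
def runs : List (String × Int) → List (List (String × Int))
  | [] => []
  | x :: xs =>
    ((x :: xs).take (runLen (x :: xs))) :: runs ((x :: xs).drop (runLen (x :: xs)))
termination_by l => l.length
decreasing_by
  simp only [List.length_drop]
  have := runLen_pos x xs
  simp only [List.length_cons]
  omega

def group_by_consecutives_alt (values : List (String × Int)) : List (List (String × Int)) :=
  runs (PySem.List.sorted values (fun x => x.2))

-- ===== PRECONDITION & SPEC =====
def Spec_group_by_consecutives (values : List (String × Int)) (out : List (List (String × Int))) : Prop := out = group_by_consecutives_alt values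
instance (values : List (String × Int)) (out : List (List (String × Int))) : Decidable (Spec_group_by_consecutives values out) := by unfold Spec_group_by_consecutives; infer_instance

-- ===== CLAIM (what is proved, stated in full; the proofs are below) =====
def Claim_equal_group_by_consecutives : Prop := ∀ (values : List (String × Int)), Dom_group_by_consecutives values → Spec_group_by_consecutives values (group_by_consecutives values)

-- ===== LEMMAS AND PROOFS =====

-- Canonical form of the tail of a run computation: after the first element of a group,
-- M L a group finishes the current group and all later groups.
def M : List (String × Int) → Int → List (String × Int) → List (List (String × Int))
  | [], _, group => [group]
  | (t, n) :: rest, a, group =>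
    if n = a + 1 then M rest n (group ++ [(t, n)]) else group :: M rest n [(t, n)]

theorem aGo_M : ∀ (L : List (String × Int)) (groups : List (List (String × Int)))
    (group : List (String × Int)) (a : Int), group ≠ [] →
    aGo L groups group (some a) = groups ++ M L a group := by
  intro L
  induction L with
  | nil => intro groups group a h; simp [aGo, M, h]
  | cons hd tl ih =>
    intro groups group a h
    obtain ⟨t, n⟩ := hd
    simp only [aGo, M]
    split
    · exact ih groups (group ++ [(t, n)]) n (by simp)
    · rw [ih (groups ++ [group]) [(t, n)] n (by simp)]
      simp

-- length of the maximal chain in L continuing value a by +1 steps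
def chain : Int → List (String × Int) → Nat
  | _, [] => 0
  | a, (_, n) :: rest => if n = a + 1 then 1 + chain n rest else 0

theorem runLen_cons : ∀ (L : List (String × Int)) (t : String) (n : Int),
    runLen ((t, n) :: L) = 1 + chain n L := by
  intro L
  induction L with
  | nil => intro t n; simp [runLen, chain]
  | cons hd tl ih =>
    intro t n
    obtain ⟨t', n'⟩ := hd
    simp only [runLen, chain]
    split
    · rw [ih]
    · rfl

theorem runs_cons (x : String × Int) (xs : List (String × Int)) :
    runs (x :: xs) = ((x :: xs).take (runLen (x :: xs))) :: runs ((x :: xs).drop (runLen (x :: xs))) := by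
  rw [runs.eq_def]

theorem M_runs : ∀ (L : List (String × Int)) (a : Int) (acc : List (String × Int)),
    M L a acc = (acc ++ L.take (chain a L)) :: runs (L.drop (chain a L)) := by
  intro L
  induction L with
  | nil => intro a acc; simp [M, chain, runs]
  | cons hd tl ih =>
    intro a acc
    obtain ⟨t, n⟩ := hd
    simp only [M, chain]
    split
    · rw [ih n (acc ++ [(t, n)]), Nat.add_comm 1 (chain n tl)]
      simp [List.take_succ_cons, List.drop_succ_cons]
    · simp only [List.take_zero, List.drop_zero, List.append_nil]
      rw [runs_cons, runLen_cons, Nat.add_comm 1 (chain n tl)]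
      simp only [List.take_succ_cons, List.drop_succ_cons]
      rw [ih n [(t, n)]]
      simp

-- ===== VERDICT (by name: the statement is the Claim_ definition above) =====
theorem group_by_consecutives_spec : Claim_equal_group_by_consecutives := by
  intro values _
  unfold Spec_group_by_consecutives group_by_consecutives group_by_consecutives_alt
  cases h : PySem.List.sorted values (fun x => x.2) with
  | nil => simp [aGo, runs]
  | cons hd tl =>
    obtain ⟨t, n⟩ := hd
    simp only [aGo, List.nil_append]
    rw [aGo_M tl [] [(t, n)] n (by simp), M_runs]
    rw [runs_cons, runLen_cons, Nat.add_comm 1 (chain n tl)]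
    simp
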